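-- pv_equiv track=rewrite | github.com/guntashgill/cs-8-zybooks | functions.py | is_num_str_list
-- ===== SOURCE A (Python) =====
-- def is_num(val):
--     """
--     The function checks if `val` is a string;
--     returns False if `val` is not a string.
--     Otherwise, returns True if the string `val`
--     contains a valid integer or a float.
--     Returns False otherwise.
--     """
--     num_of_dots = 0
--     if type(val) != str:
--         return False
--     else:
--         for i in range(len(val)):
--             if '0'<= (val[i]) <= '9':
--                 continue
--             elif val[i] == '.':
--                 num_of_dots += 1
--                 if num_of_dots >1:
--                     return False
--             else:
--                 return False
--         return True
--
-- def is_num_str_list(main_list):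
--     '''to print main menu'''
--     if len(main_list) == 0:
--         return False
--
--     for i in main_list:
--         if type(i) != str:
--             return False
--         if not is_num(i):
--             return False
--     return True
-- ===== SOURCE B (Python) =====
-- def is_num_str_list(main_list):
--     if len(main_list) == 0:
--         return False
--     for v in main_list:
--         if type(v) != str:
--             return False
--         if v.strip('0123456789.') != '':
--             return False
--         if '.' in v[v.find('.') + 1:]:
--             return False
--     return True
-- ===== Notes on version B (the rewrite author's own statement) =====
-- stated objective: alternative
-- what changed: The stateful per-character counting scan of is_num is replaced by two string-primitive checks: v.strip('0123456789.') == '' for the character class and '.' not in v[v.find('.') + 1:] for at-most-one-dot, so no per-character loop or dot counter remains.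
import Mathlib
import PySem

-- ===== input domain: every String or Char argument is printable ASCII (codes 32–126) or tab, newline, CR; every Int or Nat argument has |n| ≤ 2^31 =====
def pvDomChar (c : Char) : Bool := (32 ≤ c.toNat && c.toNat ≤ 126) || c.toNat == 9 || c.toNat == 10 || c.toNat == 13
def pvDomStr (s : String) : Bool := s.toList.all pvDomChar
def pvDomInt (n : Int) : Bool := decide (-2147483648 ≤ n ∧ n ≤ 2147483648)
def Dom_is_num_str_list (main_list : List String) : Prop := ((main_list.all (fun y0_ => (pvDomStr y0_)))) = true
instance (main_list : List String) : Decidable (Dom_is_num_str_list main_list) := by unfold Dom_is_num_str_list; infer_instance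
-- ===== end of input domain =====

-- B drops A's per-character counting scan: each string is validated with str.strip (character-class check) and find + substring-in-slice (at-most-one-dot check); objective: alternative.
-- ===== PORT A =====
-- is_num: loop over characters keeping num_of_dots, early-exit on a second dot or a bad char
def isNumLoop (cs : List Char) (dots : Nat) : Bool :=
  match cs with
  | [] => true
  | c :: rest =>
    if '0' ≤ c ∧ c ≤ '9' then isNumLoop rest dots
    else if c = '.' then
      if dots + 1 > 1 then false else isNumLoop rest (dots + 1)
    else false

def isNum (val : String) : Bool := isNumLoop val.toList 0

def isNumStrListLoop (l : List String) : Bool :=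
  match l with
  | [] => true
  | s :: rest => if ¬ isNum s then false else isNumStrListLoop rest

def is_num_str_list (main_list : List String) : Bool :=
  if main_list.length = 0 then false else isNumStrListLoop main_list

-- ===== PORT B =====
-- per-string check of Source B: v.strip('0123456789.') == '' and '.' not in v[v.find('.') + 1:]
def altOk (v : String) : Bool :=
  if PySem.Str.stripChars v "0123456789." ≠ "" then false
  else if PySem.Str.isIn "." (PySem.Str.slice v (some (PySem.Str.find v "." + 1)) none) then false
  else true

def altLoop (l : List String) : Bool :=
  match l with
  | [] => true
  | v :: rest => if ¬ altOk v then false else altLoop rest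

def is_num_str_list_alt (main_list : List String) : Bool :=
  if main_list.length = 0 then false else altLoop main_list

-- ===== PRECONDITION & SPEC =====
def Spec_is_num_str_list (main_list : List String) (out : Bool) : Prop := out = is_num_str_list_alt main_list
instance (main_list : List String) (out : Bool) : Decidable (Spec_is_num_str_list main_list out) := by unfold Spec_is_num_str_list; infer_instance

-- ===== CLAIM (what is proved, stated in full; the proofs are below) =====
def Claim_equal_is_num_str_list : Prop := ∀ (main_list : List String), Dom_is_num_str_list main_list → Spec_is_num_str_list main_list (is_num_str_list main_list)

-- ===== LEMMAS AND PROOFS =====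

-- A-side characterisation: at most one dot and every char a digit or a dot
theorem isNumLoop_eq (cs : List Char) (dots : Nat) (hdots : dots ≤ 1) :
    isNumLoop cs dots =
      (decide (cs.count '.' + dots ≤ 1) &&
        cs.all (fun c => ('0' ≤ c && c ≤ '9') || c == '.')) := by
  induction cs generalizing dots with
  | nil => simpa [isNumLoop] using hdots
  | cons c rest ih =>
    simp only [isNumLoop]
    by_cases hd : '0' ≤ c ∧ c ≤ '9'
    · have hne : c ≠ '.' := by
        rintro rfl
        revert hd; decide
      simp [hd, ih dots hdots, hne]
    · by_cases hp : c = '.'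
      · subst hp
        by_cases h1 : dots + 1 > 1
        · have h2 : ¬ (rest.count '.' + 1 + dots ≤ 1) := by omega
          simp [h1, h2]
        · have h2 : rest.count '.' + 1 + dots = rest.count '.' + (dots + 1) := by omega
          simp [h1, ih (dots + 1) (by omega), h2]
      · simp only [hd, if_false, if_neg hp, List.all_cons]
        have hc : (decide ('0' ≤ c) && decide (c ≤ '9') || c == '.') = false := by
          rcases Decidable.not_and_iff_or_not.mp hd with h | h <;> simp [hp, h]
        simp [hc]

theorem char_toNat_inj {a b : Char} (h : a.toNat = b.toNat) : a = b :=
  Char.ext (UInt32.toNat_inj.mp h)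

theorem char_beq_toNat (a b : Char) : (a == b) = decide (a.toNat = b.toNat) := by
  by_cases h : a = b
  · simp [h]
  · have h2 : a.toNat ≠ b.toNat := fun hn => h (char_toNat_inj hn)
    simp [h, h2]

-- the allowed character set of B's strip equals A's character test
theorem contains_allowed (c : Char) :
    ("0123456789.".toList.contains c) = (('0' ≤ c && c ≤ '9') || c == '.') := by
  have h : "0123456789.".toList = ['0','1','2','3','4','5','6','7','8','9','.'] := rfl
  rw [h]
  simp only [List.contains_cons, List.contains_nil, Bool.or_false, char_beq_toNat,
    Char.le_def, UInt32.le_iff_toNat_le]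
  rw [Bool.eq_iff_iff]
  simp only [Bool.or_eq_true, Bool.and_eq_true, decide_eq_true_eq,
    Char.toNat, show ('0':Char).val.toNat = 48 from rfl, show ('1':Char).val.toNat = 49 from rfl, show ('2':Char).val.toNat = 50 from rfl, show ('3':Char).val.toNat = 51 from rfl, show ('4':Char).val.toNat = 52 from rfl, show ('5':Char).val.toNat = 53 from rfl, show ('6':Char).val.toNat = 54 from rfl, show ('7':Char).val.toNat = 55 from rfl, show ('8':Char).val.toNat = 56 from rfl, show ('9':Char).val.toNat = 57 from rfl, show ('.':Char).val.toNat = 46 from rfl]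
  omega

theorem forall_dropWhile_iff (p : Char → Bool) (cs : List Char) :
    (∀ x ∈ cs.dropWhile p, p x) ↔ ∀ x ∈ cs, p x := by
  induction cs with
  | nil => simp
  | cons c rest ih =>
    by_cases hc : p c
    · simp only [List.dropWhile_cons, hc, if_true, ih, List.mem_cons]
      constructor
      · rintro h x (rfl | hx)
        · exact hc
        · exact h x hx
      · intro h x hx
        exact h x (Or.inr hx)
    · simp only [List.dropWhile_cons, hc]
      simp [hc]

-- strip to empty ↔ every char allowed
theorem stripChars_eq_nil_iff (cs chars : List Char) :
    PySem.Chars.stripChars cs chars = [] ↔ ∀ c ∈ cs, chars.contains c := by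
  unfold PySem.Chars.stripChars
  rw [List.reverse_eq_nil_iff, List.dropWhile_eq_nil_iff]
  constructor
  · intro h
    apply (forall_dropWhile_iff _ cs).mp
    intro x hx
    exact h x (List.mem_reverse.mpr hx)
  · intro h x hx
    exact h x ((List.dropWhile_sublist _).subset (List.mem_reverse.mp hx))

theorem singleton_infix_iff_mem (a : Char) (l : List Char) : [a] <:+: l ↔ a ∈ l := by
  constructor
  · intro h
    exact h.subset (List.mem_singleton_self a)
  · intro h
    obtain ⟨s, t, rfl⟩ := List.append_of_mem h
    exact ⟨s, t, by simp⟩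

-- B's find/slice dot test ↔ at most one dot
theorem dot_test_iff (cs : List Char) :
    (PySem.Chars.isIn ['.'] (PySem.List.slice cs (some (PySem.Chars.find cs ['.'] + 1)) none) = false)
      ↔ cs.count '.' ≤ 1 := by
  by_cases h0 : '.' ∈ cs
  · have hinf : ['.'] <:+: cs := (singleton_infix_iff_mem _ _).mpr h0
    have hnn : 0 ≤ PySem.Chars.find cs ['.'] := (PySem.Chars.find_nonneg_iff _ _).mpr hinf
    set f := PySem.Chars.find cs ['.'] with hf
    have hle : f ≤ cs.length := PySem.Chars.find_le_length cs ['.']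
    obtain ⟨hpre, hmin⟩ := PySem.Chars.find_spec (s := cs) (sub := ['.']) hnn
    set i := f.toNat with hi
    have hiL : i ≤ cs.length := by omega
    have hilt : i < cs.length := by
      rcases Nat.lt_or_ge i cs.length with h | h
      · exact h
      · exfalso
        have : cs.drop i = [] := List.drop_eq_nil_of_le h
        rw [this] at hpre
        exact absurd (List.prefix_nil.mp hpre) (by simp)
    have hdrop : cs.drop i = '.' :: cs.drop (i + 1) := by
      have hd := List.drop_eq_getElem_cons hilt
      have hhead : cs[i] = '.' := by
        obtain ⟨t, ht⟩ := hpre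
        rw [hd] at ht
        exact (List.cons_eq_cons.mp ht.symm).1
      rw [hd, hhead]
    have hf1 : f + 1 = ((i + 1 : Nat) : Int) := by omega
    rw [hf1, PySem.List.slice_from_natCast]
    have htake : (cs.take i).count '.' = 0 := by
      rw [List.count_eq_zero]
      intro hmem
      obtain ⟨j, hj, hjv⟩ := List.getElem_of_mem hmem
      have hjlt : j < i := by
        have hjl : j < (cs.take i).length := hj
        simp [List.length_take] at hjl
        omega
      have hjL : j < cs.length := by omega
      have hjd : cs[j] = '.' := by
        rw [List.getElem_take] at hjv
        exact hjv
      apply hmin j (by omega)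
      rw [List.drop_eq_getElem_cons hjL, hjd]
      exact ⟨cs.drop (j+1), rfl⟩
    have hcount : cs.count '.' = 1 + (cs.drop (i+1)).count '.' := by
      conv_lhs => rw [← List.take_append_drop i cs]
      rw [List.count_append, htake, hdrop]
      simp
      omega
    constructor
    · intro h
      rw [PySem.Chars.isIn_eq_false_iff _ _, singleton_infix_iff_mem] at h
      have : (cs.drop (i+1)).count '.' = 0 := List.count_eq_zero.mpr (by
        intro hmem; exact h hmem)
      omega
    · intro h
      rw [PySem.Chars.isIn_eq_false_iff _ _, singleton_infix_iff_mem]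
      intro hmem
      have := List.count_pos_iff.mpr hmem
      omega
  · have hninf : ¬ ['.'] <:+: cs := fun h => h0 ((singleton_infix_iff_mem _ _).mp h)
    have hfind : PySem.Chars.find cs ['.'] = -1 := (PySem.Chars.find_eq_neg_one_iff _ _).mpr hninf
    rw [hfind]
    have h01 : (-1 : Int) + 1 = ((0 : Nat) : Int) := by norm_num
    rw [h01, PySem.List.slice_from_natCast]
    simp only [List.drop_zero]
    constructor
    · intro _
      have : cs.count '.' = 0 := List.count_eq_zero.mpr h0
      omega
    · intro _
      rw [PySem.Chars.isIn_eq_false_iff _ _, singleton_infix_iff_mem]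
      exact h0

-- per-string equality: B's strip + find/slice test equals A's scan
theorem altOk_eq (v : String) :
    altOk v =
      (decide (v.toList.count '.' ≤ 1) &&
        v.toList.all (fun c => ('0' ≤ c && c ≤ '9') || c == '.')) := by
  have hstrip : (PySem.Str.stripChars v "0123456789." = "") ↔
      (v.toList.all (fun c => ('0' ≤ c && c ≤ '9') || c == '.')) = true := by
    rw [← String.toList_inj, PySem.Str.toList_stripChars,
      show ("" : String).toList = [] from rfl, stripChars_eq_nil_iff]
    simp only [List.all_eq_true, contains_allowed]
  have hdot : (PySem.Str.isIn "." (PySem.Str.slice v (some (PySem.Str.find v "." + 1)) none) = false)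
      ↔ v.toList.count '.' ≤ 1 := by
    rw [PySem.Str.isIn_eq, PySem.Str.toList_slice, PySem.Chars.slice_eq_listSlice,
      PySem.Str.find_eq, show (".".toList) = ['.'] from rfl]
    exact dot_test_iff v.toList
  unfold altOk
  split_ifs with hA hB
  · have : ¬ (v.toList.all (fun c => ('0' ≤ c && c ≤ '9') || c == '.')) = true := by
      intro h; exact hA (hstrip.mpr h)
    simp [this]
  · have h2 : ¬ v.toList.count '.' ≤ 1 := by
      intro h
      have hf := hdot.mpr h
      rw [hB] at hf
      exact absurd hf (by simp)
    simp [h2]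
  · have h1 := hstrip.mp (not_not.mp hA)
    have h2 : v.toList.count '.' ≤ 1 := hdot.mp (by simpa using hB)
    simp [h1, h2]

theorem loops_eq (l : List String) : isNumStrListLoop l = altLoop l := by
  induction l with
  | nil => rfl
  | cons s rest ih =>
    simp only [isNumStrListLoop, altLoop, ih, isNum, altOk_eq,
      isNumLoop_eq _ 0 (by omega), Nat.add_zero]

-- ===== VERDICT (by name: the statement is the Claim_ definition above) =====
theorem is_num_str_list_spec : Claim_equal_is_num_str_list := by
  intro l _
  unfold Spec_is_num_str_list is_num_str_list is_num_str_list_alt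
  rw [loops_eq]
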